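-- pv_equiv track=rewrite | github.com/echoaj/CodingChallenges | Qualcomm/abcd.py | abcd
-- ===== SOURCE A (Python) =====
-- def abcd(nums):
--     result = []
--     for i in range(len(nums)):
--         for j in range(i+1, len(nums)):
--             for k in range(j+1, len(nums)):
--                 for l in range(k+1, len(nums)):
--                     if nums[i] + nums[j] == nums[k] + nums[l]:
--                         result.append([nums[i], nums[j], nums[k], nums[l]])
--     return result
-- ===== SOURCE B (Python) =====
-- def abcd(nums):
--     n = len(nums)
--     # index every pair-sum once: sum -> lexicographically ordered (k, l) index pairs
--     groups = {}
--     for k in range(n):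
--         for l in range(k + 1, n):
--             groups.setdefault(nums[k] + nums[l], []).append((k, l))
--     result = []
--     for i in range(n):
--         for j in range(i + 1, n):
--             for (k, l) in groups.get(nums[i] + nums[j], []):
--                 if k > j:
--                     result.append([nums[i], nums[j], nums[k], nums[l]])
--     return result
-- ===== Notes on version B (the rewrite author's own statement) =====
-- stated objective: faster
-- what changed: Replaces the O(n^4) quadruple nested scan by first building a hash index from each pair-sum to its lex-ordered (k,l) index pairs in one O(n^2) pass, then for each (i,j) looking up only the pairs with the matching sum and filtering k>j, so the two innermost full scans disappear.
import Mathlib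
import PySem

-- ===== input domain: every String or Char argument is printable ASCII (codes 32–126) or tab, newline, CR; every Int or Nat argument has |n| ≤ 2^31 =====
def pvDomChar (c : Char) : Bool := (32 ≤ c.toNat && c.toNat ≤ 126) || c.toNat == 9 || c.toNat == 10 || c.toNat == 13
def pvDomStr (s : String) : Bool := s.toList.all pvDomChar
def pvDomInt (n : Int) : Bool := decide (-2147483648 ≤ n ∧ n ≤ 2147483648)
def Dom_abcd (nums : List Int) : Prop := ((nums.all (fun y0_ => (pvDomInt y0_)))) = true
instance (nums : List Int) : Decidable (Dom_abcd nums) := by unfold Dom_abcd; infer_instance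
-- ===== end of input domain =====

-- B replaces A's quadruple scan by a pair-sum index built once, then a lookup + k>j filter per (i,j): faster.

-- ===== PORT A =====
def abcd (nums : List Int) : List (List Int) :=
  (PySem.List.pyRange 0 (nums.length : Int) 1).foldl (fun result i =>
    (PySem.List.pyRange (i + 1) (nums.length : Int) 1).foldl (fun result j =>
      (PySem.List.pyRange (j + 1) (nums.length : Int) 1).foldl (fun result k =>
        (PySem.List.pyRange (k + 1) (nums.length : Int) 1).foldl (fun result l =>
          if PySem.List.pyGetD nums i 0 + PySem.List.pyGetD nums j 0 =
             PySem.List.pyGetD nums k 0 + PySem.List.pyGetD nums l 0 then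
            result ++ [[PySem.List.pyGetD nums i 0, PySem.List.pyGetD nums j 0,
                        PySem.List.pyGetD nums k 0, PySem.List.pyGetD nums l 0]]
          else result) result) result) result) []

-- ===== PORT B =====
def abcd_alt (nums : List Int) : List (List Int) :=
  let n : Int := nums.length
  -- groups: pair-sum -> lex-ordered list of (k, l) index pairs  (setdefault(...).append = modify with default [])
  let groups : PySem.Dict Int (List (Int × Int)) :=
    (PySem.List.pyRange 0 n 1).foldl (fun d k =>
      (PySem.List.pyRange (k + 1) n 1).foldl (fun d l =>
        d.modify (PySem.List.pyGetD nums k 0 + PySem.List.pyGetD nums l 0) [] (· ++ [(k, l)])) d)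
      PySem.Dict.empty
  (PySem.List.pyRange 0 n 1).foldl (fun result i =>
    (PySem.List.pyRange (i + 1) n 1).foldl (fun result j =>
      (groups.getD (PySem.List.pyGetD nums i 0 + PySem.List.pyGetD nums j 0) []).foldl
        (fun result kl =>
          if j < kl.1 then
            result ++ [[PySem.List.pyGetD nums i 0, PySem.List.pyGetD nums j 0,
                        PySem.List.pyGetD nums kl.1 0, PySem.List.pyGetD nums kl.2 0]]
          else result) result) result) []

-- ===== PRECONDITION & SPEC =====
def Spec_abcd (nums : List Int) (out : List (List Int)) : Prop := out = abcd_alt nums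
instance (nums : List Int) (out : List (List Int)) : Decidable (Spec_abcd nums out) := by unfold Spec_abcd; infer_instance

-- ===== CLAIM (what is proved, stated in full; the proofs are below) =====
def Claim_equal_abcd : Prop := ∀ (nums : List Int), Dom_abcd nums → Spec_abcd nums (abcd nums)

-- ===== LEMMAS AND PROOFS =====

-- value at index i (total form used by both ports)
def pvG (nums : List Int) (i : Int) : Int := PySem.List.pyGetD nums i 0

-- all index pairs (k, l) with a ≤ k < l < n, in lexicographic order
def pvPairs (nums : List Int) (a : Int) : List (Int × Int) :=
  (PySem.List.pyRange a (nums.length : Int) 1).flatMap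
    (fun k => (PySem.List.pyRange (k + 1) (nums.length : Int) 1).map (fun l => (k, l)))

theorem pv_foldl_flatMap {α β γ : Type} (l : List α) (g : α → List β) (f : γ → β → γ)
    (init : γ) :
    (l.flatMap g).foldl f init = l.foldl (fun a x => (g x).foldl f a) init := by
  induction l generalizing init with
  | nil => rfl
  | cons h t ih => simp [List.flatMap_cons, List.foldl_append, ih]

theorem pv_filter_flatMap {α β : Type} (l : List α) (g : α → List β) (p : β → Bool) :
    (l.flatMap g).filter p = l.flatMap (fun x => (g x).filter p) := by
  induction l with
  | nil => rfl
  | cons h t ih => simp [List.flatMap_cons, List.filter_append, ih]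

theorem pv_flatMap_congr {α β : Type} (l : List α) (f g : α → List β)
    (h : ∀ x ∈ l, f x = g x) : l.flatMap f = l.flatMap g := by
  induction l with
  | nil => rfl
  | cons a t ih =>
    simp only [List.flatMap_cons]
    rw [h a (by simp), ih (fun x hx => h x (by simp [hx]))]

-- the groups dict built by B, characterised: lookup S = all pairs with that sum, lex order
theorem pv_groups_getD (nums : List Int) (S : Int) :
    (((PySem.List.pyRange 0 (nums.length : Int) 1).foldl (fun d k =>
        (PySem.List.pyRange (k + 1) (nums.length : Int) 1).foldl (fun d l =>
          d.modify (PySem.List.pyGetD nums k 0 + PySem.List.pyGetD nums l 0) [] (· ++ [(k, l)])) d)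
        PySem.Dict.empty).getD S [])
    = (pvPairs nums 0).filter (fun p => pvG nums p.1 + pvG nums p.2 == S) := by
  have hb : (PySem.List.pyRange 0 (nums.length : Int) 1).foldl (fun d k =>
        (PySem.List.pyRange (k + 1) (nums.length : Int) 1).foldl (fun d l =>
          d.modify (PySem.List.pyGetD nums k 0 + PySem.List.pyGetD nums l 0) [] (· ++ [(k, l)])) d)
        PySem.Dict.empty
      = ((pvPairs nums 0).map (fun p => (pvG nums p.1 + pvG nums p.2, p))).foldl
          (fun d q => d.modify q.1 [] (· ++ [q.2])) PySem.Dict.empty := by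
    rw [List.foldl_map]
    unfold pvPairs
    rw [pv_foldl_flatMap]
    simp only [List.foldl_map]
    rfl
  rw [hb, PySem.Dict.getD_foldl_modify_append, List.filter_map, List.map_map]
  simp only [Function.comp_def, pvG]
  simp

-- filtering the full lex pair list by k > j keeps exactly the pairs starting above j
theorem pv_filter_lt (nums : List Int) (j : Int) (h0 : 0 ≤ j)
    (h1 : j < (nums.length : Int)) :
    (pvPairs nums 0).filter (fun p => decide (j < p.1)) = pvPairs nums (j + 1) := by
  unfold pvPairs
  rw [pv_filter_flatMap,
      PySem.List.pyRange_one_append 0 (j + 1) (nums.length : Int) (by omega) (by omega),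
      List.flatMap_append]
  have hlow : ((PySem.List.pyRange 0 (j + 1) 1).flatMap (fun k =>
      ((PySem.List.pyRange (k + 1) (nums.length : Int) 1).map (fun l => (k, l))).filter
        (fun p => decide (j < p.1)))) = (PySem.List.pyRange 0 (j + 1) 1).flatMap
        (fun _ => ([] : List (Int × Int))) := by
    apply pv_flatMap_congr
    intro k hk
    rw [PySem.List.mem_pyRange_one] at hk
    apply List.filter_eq_nil_iff.mpr
    intro p hp
    obtain ⟨l, _, rfl⟩ := List.mem_map.mp hp
    simp
    omega
  have hhigh : ((PySem.List.pyRange (j + 1) (nums.length : Int) 1).flatMap (fun k =>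
      ((PySem.List.pyRange (k + 1) (nums.length : Int) 1).map (fun l => (k, l))).filter
        (fun p => decide (j < p.1)))) = (PySem.List.pyRange (j + 1) (nums.length : Int) 1).flatMap
        (fun k => (PySem.List.pyRange (k + 1) (nums.length : Int) 1).map (fun l => (k, l))) := by
    apply pv_flatMap_congr
    intro k hk
    rw [PySem.List.mem_pyRange_one] at hk
    apply List.filter_eq_self.mpr
    intro p hp
    obtain ⟨l, _, rfl⟩ := List.mem_map.mp hp
    simp
    omega
  rw [hlow, hhigh]
  simp

-- per (i, j): A's two innermost scans emit the same list as B's group lookup + k > j pass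
theorem pv_inner (nums : List Int) (i j : Int) (r : List (List Int)) (h0 : 0 ≤ j)
    (h1 : j < (nums.length : Int)) :
    (PySem.List.pyRange (j + 1) (nums.length : Int) 1).foldl (fun result k =>
        (PySem.List.pyRange (k + 1) (nums.length : Int) 1).foldl (fun result l =>
          if PySem.List.pyGetD nums i 0 + PySem.List.pyGetD nums j 0 =
             PySem.List.pyGetD nums k 0 + PySem.List.pyGetD nums l 0 then
            result ++ [[PySem.List.pyGetD nums i 0, PySem.List.pyGetD nums j 0,
                        PySem.List.pyGetD nums k 0, PySem.List.pyGetD nums l 0]]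
          else result) result) r
    = ((pvPairs nums 0).filter (fun p =>
          pvG nums p.1 + pvG nums p.2 == pvG nums i + pvG nums j)).foldl
        (fun result kl =>
          if j < kl.1 then
            result ++ [[PySem.List.pyGetD nums i 0, PySem.List.pyGetD nums j 0,
                        PySem.List.pyGetD nums kl.1 0, PySem.List.pyGetD nums kl.2 0]]
          else result) r := by
  -- normalise both sides to r ++ <emitted list>
  rw [PySem.List.foldl_append_ite (p := fun kl : Int × Int => j < kl.1)
        (f := fun kl : Int × Int => [PySem.List.pyGetD nums i 0, PySem.List.pyGetD nums j 0,
          PySem.List.pyGetD nums kl.1 0, PySem.List.pyGetD nums kl.2 0])]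
  rw [List.filter_filter,
      List.filter_congr (fun (a : Int × Int) _ => Bool.and_comm (decide (j < a.1)) _),
      ← List.filter_filter, pv_filter_lt nums j h0 h1]
  have hA : ∀ (k : Int) (result : List (List Int)),
      (PySem.List.pyRange (k + 1) (nums.length : Int) 1).foldl (fun result l =>
          if PySem.List.pyGetD nums i 0 + PySem.List.pyGetD nums j 0 =
             PySem.List.pyGetD nums k 0 + PySem.List.pyGetD nums l 0 then
            result ++ [[PySem.List.pyGetD nums i 0, PySem.List.pyGetD nums j 0,
                        PySem.List.pyGetD nums k 0, PySem.List.pyGetD nums l 0]]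
          else result) result
      = result ++
          (((PySem.List.pyRange (k + 1) (nums.length : Int) 1).map (fun l => (k, l))).filter
            (fun p => pvG nums p.1 + pvG nums p.2 == pvG nums i + pvG nums j)).map
            (fun p => [PySem.List.pyGetD nums i 0, PySem.List.pyGetD nums j 0,
                       PySem.List.pyGetD nums p.1 0, PySem.List.pyGetD nums p.2 0]) := by
    intro k result
    rw [PySem.List.foldl_append_ite (p := fun l : Int =>
          PySem.List.pyGetD nums i 0 + PySem.List.pyGetD nums j 0 =
          PySem.List.pyGetD nums k 0 + PySem.List.pyGetD nums l 0)
        (f := fun l : Int => [PySem.List.pyGetD nums i 0, PySem.List.pyGetD nums j 0,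
          PySem.List.pyGetD nums k 0, PySem.List.pyGetD nums l 0])]
    rw [List.filter_map, List.map_map]
    have hp : ∀ l ∈ PySem.List.pyRange (k + 1) (nums.length : Int) 1,
        ((fun p : Int × Int => pvG nums p.1 + pvG nums p.2 == pvG nums i + pvG nums j) ∘
          (fun l => (k, l))) l
        = decide (PySem.List.pyGetD nums i 0 + PySem.List.pyGetD nums j 0 =
            PySem.List.pyGetD nums k 0 + PySem.List.pyGetD nums l 0) := by
      intro l _
      simp only [Function.comp_apply, pvG]
      rw [Bool.eq_iff_iff]
      simp only [beq_iff_eq, decide_eq_true_eq]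
      exact eq_comm
    rw [List.filter_congr hp]
    rfl
  simp only [hA]
  rw [PySem.List.foldl_append_eq_flatMap]
  unfold pvPairs
  rw [pv_filter_flatMap, List.map_flatMap]

theorem abcd_main : ∀ (nums : List Int), abcd nums = abcd_alt nums := by
  intro nums
  unfold abcd abcd_alt
  simp only []
  apply PySem.List.foldl_congr_mem
  intro acc i hi
  apply PySem.List.foldl_congr_mem
  intro acc2 j hj
  rw [PySem.List.mem_pyRange_one] at hi hj
  rw [pv_groups_getD]
  exact pv_inner nums i j acc2 (by omega) (by omega)

-- ===== VERDICT (by name: the statement is the Claim_ definition above) =====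
theorem abcd_spec : Claim_equal_abcd := by
  intro nums _
  exact (abcd_main nums).symm ▸ rfl
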